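-- pv_equiv track=rewrite | github.com/Onurallp/Case-Algorithm | Task_1/process.py | find_winter_summer
-- ===== SOURCE A (Python) =====
-- def find_winter_summer(arr):
--     if not arr:
--         raise ValueError("Array is empty. Cannot partition.")
--
--     low_numbers = [arr[0]]  # Initialize the low_numbers array with the first element
--     high_numbers = []
--
--     for num in arr[1:]:  # Check elements starting from second index.
--         # Check prior element and check if all elements in high_numbers are indeed bigger than each element of low_numbers array
--         if num >= low_numbers[-1] and all(num > x for x in low_numbers):
--             high_numbers.append(num)
--         else:
--             # check if elements in low_numbers are indeed smaller than each element of the high_numbers array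
--             if all(num < x for x in high_numbers):
--                 low_numbers.append(num)
--             else:
--                 high_numbers.append(num)
--
--     return low_numbers, high_numbers
-- ===== SOURCE B (Python) =====
-- def find_winter_summer(arr):
--     # One pass keeping the running max of low_numbers and min of high_numbers,
--     # so no inner rescans are needed.
--     low_numbers = [arr[0]]
--     high_numbers = []
--     mx = arr[0]          # max of low_numbers
--     mn = None            # min of high_numbers (None while empty)
--     for num in arr[1:]:
--         if num > mx:
--             high_numbers.append(num)
--             mn = num if mn is None or num < mn else mn
--         elif mn is None or num < mn:
--             low_numbers.append(num)
--         else: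
--             high_numbers.append(num)
--     return low_numbers, high_numbers
-- ===== Notes on version B (the rewrite author's own statement) =====
-- stated objective: faster
-- what changed: B carries a running max of low_numbers and min of high_numbers through a single pass, eliminating A's inner all(...) rescans of both lists on every element.
import Mathlib
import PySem

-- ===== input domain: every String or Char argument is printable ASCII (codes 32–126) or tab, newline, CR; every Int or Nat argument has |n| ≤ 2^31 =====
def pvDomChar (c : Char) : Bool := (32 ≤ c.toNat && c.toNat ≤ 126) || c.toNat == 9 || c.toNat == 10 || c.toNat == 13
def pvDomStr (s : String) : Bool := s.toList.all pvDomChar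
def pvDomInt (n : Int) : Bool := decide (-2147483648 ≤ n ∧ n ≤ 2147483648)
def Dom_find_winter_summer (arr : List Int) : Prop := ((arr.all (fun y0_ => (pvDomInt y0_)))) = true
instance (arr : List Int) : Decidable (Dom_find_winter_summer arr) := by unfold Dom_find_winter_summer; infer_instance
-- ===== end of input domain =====

-- B replaces A's quadratic inner rescans of low_numbers/high_numbers by a running
-- max-of-low / min-of-high carried through one pass (objective: faster, asymptotic).

-- ===== PORT A =====
-- one loop step of A: the two 'all' rescans and the branch order, verbatim
def findWSStepA (st : List Int × List Int) (num : Int) : List Int × List Int :=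
  let low := st.1
  let high := st.2
  -- 'low_numbers[-1]' : low is never empty (starts as [arr[0]]), so getD 0 never fires
  if num ≥ (PySem.List.pyGet? low (-1)).getD 0 ∧ low.all (fun x => num > x) then
    (low, high ++ [num])
  else if high.all (fun x => num < x) then
    (low ++ [num], high)
  else
    (low, high ++ [num])

def find_winter_summer (arr : List Int) : List Int × List Int :=
  match arr with
  | [] => ([], [])          -- A raises ValueError here; excluded by Pre_
  | a :: rest => rest.foldl findWSStepA ([a], [])   -- arr[1:] of a::rest is rest

-- ===== PORT B =====
-- 'mn is None or num < mn'
-- new min of high after appending num (the 'num if mn is None or num < mn else mn')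
def wsMnUpd (mn : Option Int) (num : Int) : Int :=
  match mn with | none => num | some m => if num < m then num else m

def wsMnTest (mn : Option Int) (num : Int) : Bool :=
  match mn with | none => true | some m => decide (num < m)

-- state: (low, high, max of low, min of high (none while high is empty))
def findWSStepB (st : List Int × List Int × Int × Option Int) (num : Int) :
    List Int × List Int × Int × Option Int :=
  let low := st.1
  let high := st.2.1
  let mx := st.2.2.1
  let mn := st.2.2.2
  if num > mx then
    (low, high ++ [num], mx, some (wsMnUpd mn num))
  else if wsMnTest mn num then
    (low ++ [num], high, mx, mn)
  else
    (low, high ++ [num], mx, mn)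

def find_winter_summer_alt (arr : List Int) : List Int × List Int :=
  match arr with
  | [] => ([], [])          -- B raises IndexError here; excluded by Pre_
  | a :: rest =>
    let s := rest.foldl findWSStepB ([a], [], a, none)
    (s.1, s.2.1)

-- ===== PRECONDITION & SPEC =====
-- A raises ValueError on the empty list (and B's arr[0] raises IndexError): excluded.
def Pre_find_winter_summer (arr : List Int) : Prop := arr ≠ []
instance (arr : List Int) : Decidable (Pre_find_winter_summer arr) := by
  unfold Pre_find_winter_summer; infer_instance
def pvWitness_find_winter_summer : List Int := [3, 1, 4, 1, 5]

def Spec_find_winter_summer (arr : List Int) (out : List Int × List Int) : Prop := out = find_winter_summer_alt arr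
instance (arr : List Int) (out : List Int × List Int) : Decidable (Spec_find_winter_summer arr out) := by unfold Spec_find_winter_summer; infer_instance

-- ===== CLAIM (what is proved, stated in full; the proofs are below) =====
def Claim_equal_find_winter_summer : Prop := ∀ (arr : List Int), Dom_find_winter_summer arr → Pre_find_winter_summer arr → Spec_find_winter_summer arr (find_winter_summer arr)

-- ===== LEMMAS AND PROOFS =====

-- the loop invariant tying B's scalars to A's lists
def WSInv (low high : List Int) (mx : Int) (mn : Option Int) : Prop :=
  low ≠ [] ∧ mx ∈ low ∧ (∀ x ∈ low, x ≤ mx) ∧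
  (match mn with
   | none => high = []
   | some m => m ∈ high ∧ ∀ x ∈ high, m ≤ x)

theorem wsFold_eq (rest : List Int) :
    ∀ (low high : List Int) (mx : Int) (mn : Option Int), WSInv low high mx mn →
      rest.foldl findWSStepA (low, high) =
        ((rest.foldl findWSStepB (low, high, mx, mn)).1,
         (rest.foldl findWSStepB (low, high, mx, mn)).2.1) := by
  induction rest with
  | nil => intro _ _ _ _ _; rfl
  | cons num rest ih =>
    intro low high mx mn hInv
    obtain ⟨hne, hmxmem, hmxub, hmn⟩ := hInv
    simp only [List.foldl_cons]
    -- condition of A's first branch ↔ num > mx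
    have hlast : (PySem.List.pyGet? low (-1)).getD 0 ∈ low := by
      rw [PySem.List.pyGet?_neg_one]
      cases low with
      | nil => exact absurd rfl hne
      | cons a l =>
        rw [List.getLast?_eq_some_getLast (by simp)]
        simp [List.getLast_mem]
    have hcond1 : (num ≥ (PySem.List.pyGet? low (-1)).getD 0 ∧
        low.all (fun x => num > x)) ↔ num > mx := by
      constructor
      · rintro ⟨-, hall⟩
        exact (by simpa using (List.all_eq_true.mp hall) mx hmxmem)
      · intro hgt
        refine ⟨le_trans (hmxub _ hlast) (le_of_lt hgt), ?_⟩
        simp only [List.all_eq_true, decide_eq_true_eq]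
        intro x hx; exact lt_of_le_of_lt (hmxub x hx) hgt
    -- condition of A's second branch ↔ B's mn-test
    have hcond2 : (high.all (fun x => num < x)) = wsMnTest mn num := by
      unfold wsMnTest
      cases mn with
      | none => simp_all
      | some m =>
        obtain ⟨hmmem, hmlb⟩ := hmn
        by_cases h : num < m
        · simp only [h, decide_true]
          simp only [List.all_eq_true, decide_eq_true_eq]
          intro x hx; exact lt_of_lt_of_le h (hmlb x hx)
        · simp only [h, decide_false]
          exact List.all_eq_false.mpr ⟨m, hmmem, by simpa using h⟩
    by_cases h1 : num > mx
    · -- both go to high; B updates mn to min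
      have stepA : findWSStepA (low, high) num = (low, high ++ [num]) := by
        simp [findWSStepA, hcond1.mpr h1]
      have stepB : findWSStepB (low, high, mx, mn) num =
          (low, high ++ [num], mx, some (wsMnUpd mn num)) := by
        simp [findWSStepB, h1]
      rw [stepA, stepB]
      apply ih
      refine ⟨hne, hmxmem, hmxub, ?_⟩
      unfold wsMnUpd
      cases mn with
      | none => simp_all
      | some m =>
        obtain ⟨hmmem, hmlb⟩ := hmn
        by_cases h2 : num < m
        · simp only [if_pos h2]
          exact ⟨by simp, by
            intro x hx
            rcases List.mem_append.mp hx with hx | hx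
            · exact le_trans (le_of_lt h2) (hmlb x hx)
            · simp at hx; omega⟩
        · simp only [if_neg h2]
          exact ⟨by simp [hmmem], by
            intro x hx
            rcases List.mem_append.mp hx with hx | hx
            · exact hmlb x hx
            · simp at hx; omega⟩
    · have hnc1 : ¬ (num ≥ (PySem.List.pyGet? low (-1)).getD 0 ∧
          low.all (fun x => num > x)) := fun hc => h1 (hcond1.mp hc)
      by_cases h2 : wsMnTest mn num = true
      · -- both go to low
        have stepA : findWSStepA (low, high) num = (low ++ [num], high) := by
          simp only [findWSStepA]
          rw [if_neg hnc1, if_pos (by rw [hcond2]; exact h2)]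
        have stepB : findWSStepB (low, high, mx, mn) num = (low ++ [num], high, mx, mn) := by
          simp only [findWSStepB]
          rw [if_neg h1, if_pos h2]
        rw [stepA, stepB]
        apply ih
        refine ⟨by simp, List.mem_append_left _ hmxmem, ?_, hmn⟩
        intro x hx
        rcases List.mem_append.mp hx with hx | hx
        · exact hmxub x hx
        · simp at hx; omega
      · -- both go to high; mn unchanged (num ≥ mn)
        have stepA : findWSStepA (low, high) num = (low, high ++ [num]) := by
          simp only [findWSStepA]
          rw [if_neg hnc1, if_neg (by rw [hcond2]; exact h2)]
        have stepB : findWSStepB (low, high, mx, mn) num = (low, high ++ [num], mx, mn) := by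
          simp only [findWSStepB]
          rw [if_neg h1, if_neg h2]
        rw [stepA, stepB]
        apply ih
        refine ⟨hne, hmxmem, hmxub, ?_⟩
        cases mn with
        | none => simp [wsMnTest] at h2
        | some m =>
          obtain ⟨hmmem, hmlb⟩ := hmn
          simp only [wsMnTest, decide_eq_true_eq] at h2
          exact ⟨List.mem_append_left _ hmmem, by
            intro x hx
            rcases List.mem_append.mp hx with hx | hx
            · exact hmlb x hx
            · simp at hx; omega⟩

-- ===== VERDICT (by name: the statement is the Claim_ definition above) =====
theorem find_winter_summer_spec : Claim_equal_find_winter_summer := by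
  intro arr _ hpre
  unfold Spec_find_winter_summer
  cases arr with
  | nil => exact absurd rfl hpre
  | cons a rest =>
    simp only [find_winter_summer, find_winter_summer_alt]
    exact wsFold_eq rest [a] [] a none ⟨by simp, by simp, by simp, by simp⟩
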